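-- pv_equiv track=rewrite | github.com/Zaki171/Logical-Tableau | tableau.py | con
-- ===== SOURCE A (Python) =====
-- def con(fmla):
--     connective = None
--     bracCount = 0
--     for c in fmla[1:len(fmla)-1]:
--         if c == '(':
--             bracCount = bracCount + 1
--         if c == ')':
--             bracCount = bracCount - 1
--         if (c == '>' or c == 'v' or c == '^') and bracCount == 0:
--             connective = c
--             break
--     return connective
-- ===== SOURCE B (Python) =====
-- def con(fmla):
--     # Stateless prefix-count test: a connective is top-level iff its prefix in the
--     # inner slice has equally many '(' and ')' (no running depth counter at all).
--     inner = fmla[1:len(fmla)-1]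
--     for i, c in enumerate(inner):
--         if c in ('>', 'v', '^'):
--             pre = list(inner[:i])
--             if pre.count('(') == pre.count(')'):
--                 return c
--     return None
-- ===== Notes on version B (the rewrite author's own statement) =====
-- stated objective: alternative
-- what changed: A's stateful scan with a running bracket counter and early break is replaced by a stateless per-candidate test: for each connective occurrence, compare the number of '(' and ')' in its prefix of the inner slice (prefix counts instead of any depth accumulator).
import Mathlib
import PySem

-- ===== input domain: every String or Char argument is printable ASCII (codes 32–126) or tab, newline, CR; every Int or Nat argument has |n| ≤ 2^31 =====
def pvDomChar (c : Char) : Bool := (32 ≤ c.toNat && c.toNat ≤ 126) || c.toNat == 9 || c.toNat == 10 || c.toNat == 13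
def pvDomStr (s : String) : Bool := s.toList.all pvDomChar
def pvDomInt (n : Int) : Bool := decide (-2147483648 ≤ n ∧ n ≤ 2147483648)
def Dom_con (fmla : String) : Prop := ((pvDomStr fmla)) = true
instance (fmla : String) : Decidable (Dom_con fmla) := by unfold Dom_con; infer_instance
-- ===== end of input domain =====

-- B replaces A's stateful counter scan by a stateless per-candidate test: each
-- connective occurrence is judged top-level by comparing the '(' and ')' counts
-- of its prefix (objective: alternative; not faster).

-- ===== PORT A =====
-- A's for-loop with early break over fmla[1:len(fmla)-1], carrying bracCount
def conLoop : List Char → Int → Option String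
  | [], _ => none
  | c :: rest, b =>
    let b1 := if c = '(' then b + 1 else b
    let b2 := if c = ')' then b1 - 1 else b1
    if (c = '>' ∨ c = 'v' ∨ c = '^') ∧ b2 = 0 then some (String.mk [c])
    else conLoop rest b2

def con (fmla : String) : Option String :=
  conLoop (PySem.Str.slice fmla (some 1) (some (PySem.Str.len fmla - 1))).toList 0

-- ===== PORT B =====
-- Source B: for i, c in enumerate(inner): if c connective and the prefix inner[:i]
-- has as many '(' as ')', return c; else None.
def con_alt (fmla : String) : Option String :=
  let inner := (PySem.Str.slice fmla (some 1) (some (PySem.Str.len fmla - 1))).toList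
  match (PySem.List.enumerate inner 0).find? (fun p =>
      (p.2 = '>' || p.2 = 'v' || p.2 = '^') &&
      ((PySem.List.slice inner none (some p.1)).count '(' ==
       (PySem.List.slice inner none (some p.1)).count ')')) with
  | some p => some (String.mk [p.2])
  | none => none

-- ===== PRECONDITION & SPEC =====
def Spec_con (fmla : String) (out : Option String) : Prop := out = con_alt fmla
instance (fmla : String) (out : Option String) : Decidable (Spec_con fmla out) := by unfold Spec_con; infer_instance

-- ===== CLAIM =====
def Claim_equal_con : Prop := ∀ (fmla : String), Dom_con fmla → Spec_con fmla (con fmla)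

-- ===== LEMMAS AND PROOFS =====

-- bracket balance of a prefix
def bal (l : List Char) : Int := (l.count '(' : Int) - (l.count ')' : Int)

lemma bal_append_conn (pre : List Char) (c : Char) (h1 : c ≠ '(') (h2 : c ≠ ')') :
    bal (pre ++ [c]) = bal pre := by
  simp [bal, List.count_append, h1, h2]

lemma bal_append (pre : List Char) (c : Char) :
    bal (pre ++ [c]) =
      (if c = ')' then (if c = '(' then bal pre + 1 else bal pre) - 1
       else (if c = '(' then bal pre + 1 else bal pre)) := by
  by_cases h1 : c = '(' <;> by_cases h2 : c = ')' <;>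
    simp_all [bal, List.count_append, List.count_singleton] <;> omega

lemma conLoop_eq (cs pre : List Char) :
    conLoop cs (bal pre) =
      (match (PySem.List.enumerate cs (pre.length : Int)).find? (fun p =>
          (p.2 = '>' || p.2 = 'v' || p.2 = '^') &&
          ((PySem.List.slice (pre ++ cs) none (some p.1)).count '(' ==
           (PySem.List.slice (pre ++ cs) none (some p.1)).count ')')) with
       | some p => some (String.mk [p.2])
       | none => none) := by
  induction cs generalizing pre with
  | nil => simp [conLoop, PySem.List.enumerate_nil]
  | cons c rest ih =>
      rw [PySem.List.enumerate_cons, List.find?_cons]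
      have hslice : PySem.List.slice (pre ++ c :: rest) none (some (pre.length : Int)) = pre := by
        rw [PySem.List.slice_to_natCast]; simp
      by_cases hc : c = '>' ∨ c = 'v' ∨ c = '^'
      · have hnp : c ≠ '(' ∧ c ≠ ')' := by
          rcases hc with h | h | h <;> subst h <;> exact ⟨by decide, by decide⟩
        by_cases hb : bal pre = 0
        · have hcounts : pre.count '(' = pre.count ')' := by
            have := hb; unfold bal at this; omega
          have hpred : ((c = '>' || c = 'v' || c = '^') &&
              ((PySem.List.slice (pre ++ c :: rest) none (some ((pre.length : Int)))).count '(' ==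
               (PySem.List.slice (pre ++ c :: rest) none (some ((pre.length : Int)))).count ')')) = true := by
            rw [hslice]
            rcases hc with h | h | h <;> simp [h, hcounts]
          rw [hpred]
          simp only [cond_true]
          simp [conLoop, hnp.1, hnp.2, hc, hb]
        · have hcounts : ¬ (pre.count '(' = pre.count ')') := by
            intro h; apply hb; unfold bal; omega
          have hpred : ((c = '>' || c = 'v' || c = '^') &&
              ((PySem.List.slice (pre ++ c :: rest) none (some ((pre.length : Int)))).count '(' ==
               (PySem.List.slice (pre ++ c :: rest) none (some ((pre.length : Int)))).count ')')) = false := by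
            rw [hslice]; simp [hcounts]
          rw [hpred]
          simp only [cond_false]
          have hstep : conLoop (c :: rest) (bal pre) = conLoop rest (bal (pre ++ [c])) := by
            rw [bal_append_conn pre c hnp.1 hnp.2]
            simp [conLoop, hnp.1, hnp.2, hc, hb]
          have h2 := ih (pre ++ [c])
          rw [← hstep] at h2
          rw [show conLoop (c :: rest) (bal pre) = _ from h2]
          simp [List.append_assoc]
        -- end connective case
      · have hpred : ((c = '>' || c = 'v' || c = '^') &&
            ((PySem.List.slice (pre ++ c :: rest) none (some ((pre.length : Int)))).count '(' ==
             (PySem.List.slice (pre ++ c :: rest) none (some ((pre.length : Int)))).count ')')) = false := by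
          push_neg at hc
          simp [hc.1, hc.2.1, hc.2.2]
        rw [hpred]
        simp only [cond_false]
        have hstep : conLoop (c :: rest) (bal pre) = conLoop rest (bal (pre ++ [c])) := by
          rw [bal_append pre c]
          simp only [conLoop]
          rw [if_neg (by tauto)]
        have h2 := ih (pre ++ [c])
        rw [← hstep] at h2
        rw [show conLoop (c :: rest) (bal pre) = _ from h2]
        simp [List.append_assoc]

-- ===== VERDICT =====
theorem con_spec : Claim_equal_con := by
  intro fmla _
  show con fmla = con_alt fmla
  rw [con, con_alt]
  have h := conLoop_eq (PySem.Str.slice fmla (some 1) (some (PySem.Str.len fmla - 1))).toList []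
  simpa [bal] using h
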